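-- pv_equiv track=rewrite | github.com/niteshchandra7/python_dsa | min_removal_cost/main.py | solve
-- ===== SOURCE A (Python) =====
-- from typing import List, Dict
--
-- def solve(arr:List[int])->int:
--     arr.sort(reverse=True)
--     arr_sum = 0
--     for elem in arr:
--         arr_sum+=elem
--     ans=0;
--     for elem in arr:
--         ans+=arr_sum
--         arr_sum-=elem
--     return ans
-- ===== SOURCE B (Python) =====
-- from typing import List
--
-- def solve(arr: List[int]) -> int:
--     # Same in-place descending sort as A (argument mutation preserved),
--     # then the answer directly as the rank-weighted sum sum((i+1)*x).
--     arr.sort(reverse=True)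
--     ans = 0
--     for i, elem in enumerate(arr):
--         ans += (i + 1) * elem
--     return ans
-- ===== Notes on version B (the rewrite author's own statement) =====
-- stated objective: simpler
-- what changed: Replaces the two-pass total-then-decreasing-suffix-sum accumulation by a single enumerate pass computing the rank-weighted sum sum((i+1)*arr[i]) over the descending-sorted array.
import Mathlib
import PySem

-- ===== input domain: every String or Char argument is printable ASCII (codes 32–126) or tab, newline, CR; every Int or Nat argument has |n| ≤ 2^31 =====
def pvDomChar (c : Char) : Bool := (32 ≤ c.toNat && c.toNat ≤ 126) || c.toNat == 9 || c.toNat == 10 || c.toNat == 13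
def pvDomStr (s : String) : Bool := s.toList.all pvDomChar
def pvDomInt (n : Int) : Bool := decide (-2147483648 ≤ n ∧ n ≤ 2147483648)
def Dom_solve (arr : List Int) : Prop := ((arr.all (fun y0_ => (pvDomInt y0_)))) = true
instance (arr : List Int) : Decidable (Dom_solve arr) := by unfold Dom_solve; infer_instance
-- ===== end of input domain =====

-- B replaces A's two-pass suffix-sum accumulation by one rank-weighted pass (simpler);
-- both sort the argument in place in Python, return-value equivalence is proved here.

-- ===== PORT A =====
def solve (arr : List Int) : Int :=
  let arr := PySem.List.sorted arr (fun x => x) true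
  let arr_sum := arr.foldl (fun s e => s + e) 0
  let st := arr.foldl (fun (st : Int × Int) e => (st.1 + st.2, st.2 - e)) (0, arr_sum)
  st.1

-- ===== PORT B =====
def solve_alt (arr : List Int) : Int :=
  let arr := PySem.List.sorted arr (fun x => x) true
  (PySem.List.enumerate arr 0).foldl (fun ans p => ans + (p.1 + 1) * p.2) 0

-- ===== PRECONDITION & SPEC =====
def Spec_solve (arr : List Int) (out : Int) : Prop := out = solve_alt arr
instance (arr : List Int) (out : Int) : Decidable (Spec_solve arr out) := by unfold Spec_solve; infer_instance

-- ===== CLAIM (what is proved, stated in full; the proofs are below) =====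
def Claim_equal_solve : Prop := ∀ (arr : List Int), Dom_solve arr → Spec_solve arr (solve arr)

-- ===== LEMMAS AND PROOFS =====

-- C l = Σ_j (n-1-j)·l[j], written recursively
def pvC : List Int → Int
  | [] => 0
  | x :: xs => (xs.length : Int) * x + pvC xs

-- T l s = Σ_j (s+1+j)·l[j], written recursively
def pvT : List Int → Int → Int
  | [], _ => 0
  | x :: xs, s => (s + 1) * x + pvT xs (s + 1)

theorem pvA_loop (l : List Int) : ∀ a t,
    (l.foldl (fun (st : Int × Int) e => (st.1 + st.2, st.2 - e)) (a, t)).1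
      = a + (l.length : Int) * t - pvC l := by
  induction l with
  | nil => intro a t; simp [pvC]
  | cons x xs ih =>
      intro a t
      simp only [List.foldl_cons, pvC, List.length_cons]
      rw [ih]
      push_cast
      ring

theorem pvB_loop (l : List Int) : ∀ a s,
    ((PySem.List.enumerate l s).foldl (fun ans p => ans + (p.1 + 1) * p.2) a)
      = a + pvT l s := by
  induction l with
  | nil => intro a s; simp [PySem.List.enumerate_nil, pvT]
  | cons x xs ih =>
      intro a s
      rw [PySem.List.enumerate_cons]
      simp only [List.foldl_cons, pvT]
      rw [ih]
      ring

theorem pvT_shift (l : List Int) : ∀ s, pvT l (s + 1) = l.sum + pvT l s := by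
  induction l with
  | nil => intro s; simp [pvT]
  | cons x xs ih =>
      intro s
      simp only [pvT, List.sum_cons]
      rw [ih (s + 1)]
      ring

theorem pvT_zero (l : List Int) : pvT l 0 = (l.length : Int) * l.sum - pvC l := by
  induction l with
  | nil => simp [pvT, pvC]
  | cons x xs ih =>
      simp only [pvT, List.sum_cons, pvC, List.length_cons]
      rw [pvT_shift, ih]
      push_cast
      ring

theorem pv_foldl_sum_gen (l : List Int) : ∀ a, l.foldl (fun s e => s + e) a = a + l.sum := by
  induction l with
  | nil => intro a; simp
  | cons y ys ih => intro a; simp only [List.foldl_cons, List.sum_cons]; rw [ih]; ring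

theorem pv_foldl_sum (l : List Int) : l.foldl (fun s e => s + e) 0 = l.sum := by
  rw [pv_foldl_sum_gen]; ring

-- ===== VERDICT (by name: the statement is the Claim_ definition above) =====
theorem solve_spec : Claim_equal_solve := by
  intro arr _
  unfold Spec_solve solve solve_alt
  simp only []
  rw [pvA_loop, pvB_loop, pv_foldl_sum, pvT_zero]
  ring
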